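-- pv_equiv track=rewrite | github.com/jiangshshui/leetcode | seventeenthPage/816_AmbiguousCoordinates.py | f
-- ===== SOURCE A (Python) =====
-- def f(s):
--     n=len(s)
--     if n==0 or n>1 and s[0]=='0' and s[n-1]=='0':
--         return []
--     if n>1 and s[0]=='0':
--         return ['0.'+s[1:]]
--     if n==1 or s[n-1]=='0':
--         return [s]
--     res=[]
--     res.append(s)
--     for i in range(1,n):
--         res.append(s[0:i]+"."+s[i:])
--     return res
-- ===== SOURCE B (Python) =====
-- def f(s):
--     def valid_int(t):
--         return t == '0' or (t != '' and t[0] != '0')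
--
--     def valid_dec(t):
--         return t != '' and t[-1] != '0'
--
--     res = [s] if valid_int(s) else []
--     for i in range(1, len(s)):
--         left, right = s[:i], s[i:]
--         if valid_int(left) and valid_dec(right):
--             res.append(left + '.' + right)
--     return res
-- ===== Notes on version B (the rewrite author's own statement) =====
-- stated objective: idiomatic
-- what changed: Replaced A's early-return case chain on the first/last character by a uniform generate-and-filter: emit the no-dot candidate and every dotted split, kept when the left part is a valid integer part and the right part a valid fractional part.
import Mathlib
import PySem

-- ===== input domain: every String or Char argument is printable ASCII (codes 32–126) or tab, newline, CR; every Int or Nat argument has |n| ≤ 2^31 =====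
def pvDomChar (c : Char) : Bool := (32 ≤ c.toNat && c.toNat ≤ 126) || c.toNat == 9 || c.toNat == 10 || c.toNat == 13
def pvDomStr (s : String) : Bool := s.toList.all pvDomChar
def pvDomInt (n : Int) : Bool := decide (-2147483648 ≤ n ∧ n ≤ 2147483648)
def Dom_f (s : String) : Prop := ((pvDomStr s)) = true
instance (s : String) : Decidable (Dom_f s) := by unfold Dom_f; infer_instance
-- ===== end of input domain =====

-- B replaces A's early-return case chain by a uniform generate-and-filter over all dot placements (idiomatic decomposition; same cost).

-- ===== PORT A =====
def f (s : String) : List String :=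
  let cs := s.toList
  let n : Int := PySem.List.len cs
  if n = 0 ∨ (1 < n ∧ PySem.List.pyGet? cs 0 = some '0' ∧ PySem.List.pyGet? cs (n - 1) = some '0') then
    []
  else if 1 < n ∧ PySem.List.pyGet? cs 0 = some '0' then
    [String.ofList ('0' :: '.' :: PySem.List.slice cs (some 1) none)]
  else if n = 1 ∨ PySem.List.pyGet? cs (n - 1) = some '0' then
    [s]
  else
    let res : List String := []
    let res := res ++ [s]
    (PySem.List.pyRange 1 n 1).foldl
      (fun acc i =>
        acc ++ [String.ofList (PySem.List.slice cs (some 0) (some i) ++ '.' :: PySem.List.slice cs (some i) none)])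
      res

-- ===== PORT B =====
-- valid_int(t): t == '0' or (t != '' and t[0] != '0')
def validInt (t : List Char) : Bool :=
  t == ['0'] || (!(t == []) && !(PySem.List.pyGet? t 0 == some '0'))

-- valid_dec(t): t != '' and t[-1] != '0'
def validDec (t : List Char) : Bool :=
  !(t == []) && !(PySem.List.pyGet? t (-1) == some '0')

def f_alt (s : String) : List String :=
  let cs := s.toList
  let res : List String := if validInt cs then [s] else []
  (PySem.List.pyRange 1 (PySem.List.len cs) 1).foldl
    (fun acc i =>
      if validInt (PySem.List.slice cs none (some i)) && validDec (PySem.List.slice cs (some i) none) then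
        acc ++ [String.ofList (PySem.List.slice cs none (some i) ++ '.' :: PySem.List.slice cs (some i) none)]
      else acc)
    res

-- ===== PRECONDITION & SPEC =====
def Spec_f (s : String) (out : List String) : Prop := out = f_alt s
instance (s : String) (out : List String) : Decidable (Spec_f s out) := by unfold Spec_f; infer_instance

-- ===== CLAIM (what is proved, stated in full; the proofs are below) =====
def Claim_equal_f : Prop := ∀ (s : String), Dom_f s → Spec_f s (f s)

-- ===== LEMMAS AND PROOFS =====

theorem validInt_take_of_head_ne {c : Char} (rest : List Char) (k : Nat)
    (hc : c ≠ '0') (hk : 1 ≤ k) : validInt ((c :: rest).take k) = true := by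
  cases k with
  | zero => omega
  | succ m =>
    simp [validInt, List.take_succ_cons, PySem.List.pyGet?, PySem.List.pyIdx?]
    tauto

theorem validInt_take_zero (rest : List Char) (k : Nat)
    (h2 : 2 ≤ k) (hlen : k ≤ ('0' :: rest).length) :
    validInt (('0' :: rest).take k) = false := by
  cases k with
  | zero => omega
  | succ m =>
    have hne : rest ≠ [] := by
      intro h; rw [h] at hlen; simp at hlen; omega
    have hr : rest.take m ≠ [] := by
      cases rest with
      | nil => exact absurd rfl hne
      | cons a t =>
        cases m with
        | zero => omega
        | succ m' => simp
    simp [validInt, List.take_succ_cons, PySem.List.pyGet?, PySem.List.pyIdx?, hr]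

theorem validDec_append_singleton (l : List Char) (d : Char) :
    validDec (l ++ [d]) = !(d == '0') := by
  simp [validDec, PySem.List.pyGet?_neg_one_append_singleton]

theorem validInt_single (c : Char) : validInt [c] = true := by
  simp [validInt, PySem.List.pyGet?, PySem.List.pyIdx?]

theorem f_eq_f_alt (s : String) : f s = f_alt s := by
  unfold f f_alt
  rcases hcs : s.toList with _ | ⟨c, tail⟩
  · simp [PySem.List.pyRange_one_eq_nil, validInt]
  · rcases List.eq_nil_or_concat tail with htail | ⟨mid, d, htail⟩
    · -- length 1
      subst htail
      simp [PySem.List.len_eq, validInt_single]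
    · -- length ≥ 2 : s.toList = c :: mid ++ [d]
      subst htail
      simp only [List.concat_eq_append]
      set cs : List Char := c :: (mid ++ [d]) with hcsdef
      have hlen : cs.length = mid.length + 2 := by simp [hcsdef]
      have hn : PySem.List.len cs = (mid.length : Int) + 2 := by
        simp [PySem.List.len_eq, hlen]
      have hget0 : PySem.List.pyGet? cs 0 = some c := by
        simp [hcsdef, PySem.List.pyGet?_zero_cons]
      have hpre : cs = (c :: mid) ++ [d] := by simp [hcsdef]
      have hgetlast : PySem.List.pyGet? cs (PySem.List.len cs - 1) = some d := by
        rw [hn]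
        have h1 : (mid.length : Int) + 2 - 1 = ((c :: mid).length : Int) := by
          simp; ring
        rw [h1, hpre, PySem.List.pyGet?_natCast]
        simp
      have hmemfacts : ∀ i ∈ PySem.List.pyRange 1 (PySem.List.len cs) 1,
          1 ≤ i ∧ i < (mid.length : Int) + 2 := by
        intro i hi
        rw [hn] at hi
        exact (PySem.List.mem_pyRange_one).1 hi
      have hdrop : ∀ i : Int, 1 ≤ i → i < (mid.length : Int) + 2 →
          PySem.List.slice cs (some i) none = (c :: mid).drop i.toNat ++ [d] := by
        intro i h1 h2
        rw [PySem.List.slice_from cs (by omega : (0:Int) ≤ i), hpre]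
        exact List.drop_append_of_le_length (by simp; omega)
      have htake : ∀ i : Int, 0 ≤ i →
          PySem.List.slice cs none (some i) = cs.take i.toNat := by
        intro i h1
        exact PySem.List.slice_to cs h1
      by_cases hd : d = '0'
      · -- last char '0': every split has invalid fractional part
        have hfilt : ∀ i ∈ PySem.List.pyRange 1 (PySem.List.len cs) 1,
            (validInt (PySem.List.slice cs none (some i)) &&
             validDec (PySem.List.slice cs (some i) none)) = false := by
          intro i hi
          obtain ⟨h1, h2⟩ := hmemfacts i hi
          rw [hdrop i h1 h2, validDec_append_singleton, hd]
          simp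
        have hfold : ∀ init : List String,
            (PySem.List.pyRange 1 (PySem.List.len cs) 1).foldl
              (fun acc i =>
                if validInt (PySem.List.slice cs none (some i)) && validDec (PySem.List.slice cs (some i) none) then
                  acc ++ [String.ofList (PySem.List.slice cs none (some i) ++ '.' :: PySem.List.slice cs (some i) none)]
                else acc) init = init := by
          intro init
          rw [PySem.List.foldl_congr_mem _ _ (fun acc _ => acc) _
            (by intro acc i hi; rw [hfilt i hi]; simp)]
          exact PySem.List.foldl_ignore _ _
        by_cases hc : c = '0'
        · -- "0...0" : A returns []
          have hA : (PySem.List.len cs = 0 ∨ (1 < PySem.List.len cs ∧ PySem.List.pyGet? cs 0 = some '0' ∧ PySem.List.pyGet? cs (PySem.List.len cs - 1) = some '0')) := by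
            right
            exact ⟨by rw [hn]; omega, by rw [hget0, hc], by rw [hgetlast, hd]⟩
          have hBInt : validInt cs = false := by
            simp [validInt, hc, hcsdef]
          simp only [if_pos hA, hBInt, Bool.false_eq_true, if_false]
          rw [hfold]
        · -- c ≠ '0', ends in '0' : A returns [s]
          have hA1 : ¬ (PySem.List.len cs = 0 ∨ (1 < PySem.List.len cs ∧ PySem.List.pyGet? cs 0 = some '0' ∧ PySem.List.pyGet? cs (PySem.List.len cs - 1) = some '0')) := by
            rw [hn, hget0]
            push Not
            exact ⟨by omega, fun _ h => absurd (Option.some.inj h) hc⟩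
          have hA2 : ¬ (1 < PySem.List.len cs ∧ PySem.List.pyGet? cs 0 = some '0') := by
            rw [hget0]; rintro ⟨_, h⟩; exact hc (Option.some.inj h)
          have hA3 : (PySem.List.len cs = 1 ∨ PySem.List.pyGet? cs (PySem.List.len cs - 1) = some '0') := by
            right; rw [hgetlast, hd]
          have hBInt : validInt cs = true := by
            simp [validInt, hget0]
            tauto
          simp only [if_neg hA1, if_neg hA2, if_pos hA3, hBInt, if_true]
          rw [hfold]
      · -- last char ≠ '0'
        have hvdec : ∀ i : Int, 1 ≤ i → i < (mid.length : Int) + 2 →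
            validDec (PySem.List.slice cs (some i) none) = true := by
          intro i h1 h2
          rw [hdrop i h1 h2, validDec_append_singleton]
          simp [hd]
        by_cases hc : c = '0'
        · -- "0xyz", z ≠ '0' : A returns ['0.' + s[1:]], B keeps exactly split i = 1
          subst hc
          have hA1 : ¬ (PySem.List.len cs = 0 ∨ (1 < PySem.List.len cs ∧ PySem.List.pyGet? cs 0 = some '0' ∧ PySem.List.pyGet? cs (PySem.List.len cs - 1) = some '0')) := by
            rw [hgetlast, hn]
            push Not
            exact ⟨by omega, fun _ _ h => hd (Option.some.inj h)⟩
          have hA2 : (1 < PySem.List.len cs ∧ PySem.List.pyGet? cs 0 = some '0') := by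
            exact ⟨by rw [hn]; omega, hget0⟩
          have hBInt : validInt cs = false := by
            simp [validInt, hcsdef]
          have hrange : PySem.List.pyRange 1 (PySem.List.len cs) 1 =
              1 :: PySem.List.pyRange 2 (PySem.List.len cs) 1 := by
            rw [hn]
            have := PySem.List.pyRange_one_cons (a := 1) (b := (mid.length : Int) + 2) (by omega)
            simpa using this
          have hfilt2 : ∀ i ∈ PySem.List.pyRange 2 (PySem.List.len cs) 1,
              (validInt (PySem.List.slice cs none (some i)) &&
               validDec (PySem.List.slice cs (some i) none)) = false := by
            intro i hi
            rw [hn] at hi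
            obtain ⟨h1, h2⟩ := (PySem.List.mem_pyRange_one).1 hi
            rw [htake i (by omega), hcsdef]
            rw [validInt_take_zero (mid ++ [d]) i.toNat (by omega) (by simp; omega)]
            simp
          have hfold2 : ∀ init : List String,
              (PySem.List.pyRange 2 (PySem.List.len cs) 1).foldl
                (fun acc i =>
                  if validInt (PySem.List.slice cs none (some i)) && validDec (PySem.List.slice cs (some i) none) then
                    acc ++ [String.ofList (PySem.List.slice cs none (some i) ++ '.' :: PySem.List.slice cs (some i) none)]
                  else acc) init = init := by
            intro init
            rw [PySem.List.foldl_congr_mem _ _ (fun acc _ => acc) _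
              (by intro acc i hi; rw [hfilt2 i hi]; simp)]
            exact PySem.List.foldl_ignore _ _
          have hcond1 : (validInt (PySem.List.slice cs none (some 1)) &&
               validDec (PySem.List.slice cs (some 1) none)) = true := by
            rw [htake 1 (by omega), hvdec 1 (by omega) (by omega)]
            simp [hcsdef, validInt]
          simp only [if_neg hA1, if_pos hA2, hBInt, Bool.false_eq_true, if_false, hrange,
            List.foldl_cons, hcond1, if_true]
          rw [hfold2]
          rw [htake 1 (by omega), PySem.List.slice_from_one]
          simp [hcsdef]
        · -- c ≠ '0', d ≠ '0' : A returns s and all splits; B keeps everything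
          have hA1 : ¬ (PySem.List.len cs = 0 ∨ (1 < PySem.List.len cs ∧ PySem.List.pyGet? cs 0 = some '0' ∧ PySem.List.pyGet? cs (PySem.List.len cs - 1) = some '0')) := by
            rw [hn, hget0]
            push Not
            exact ⟨by omega, fun _ h => absurd (Option.some.inj h) hc⟩
          have hA2 : ¬ (1 < PySem.List.len cs ∧ PySem.List.pyGet? cs 0 = some '0') := by
            rw [hget0]; rintro ⟨_, h⟩; exact hc (Option.some.inj h)
          have hA3 : ¬ (PySem.List.len cs = 1 ∨ PySem.List.pyGet? cs (PySem.List.len cs - 1) = some '0') := by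
            rw [hgetlast, hn]
            push Not
            exact ⟨by omega, fun h => hd (Option.some.inj h)⟩
          have hBInt : validInt cs = true := by
            simp [validInt, hget0]
            tauto
          simp only [if_neg hA1, if_neg hA2, if_neg hA3, hBInt, if_true, List.nil_append]
          refine (PySem.List.foldl_congr_mem _ _ _ _ ?_).symm
          intro acc i hi
          obtain ⟨h1, h2⟩ := hmemfacts i hi
          have hvi : validInt (PySem.List.slice cs none (some i)) = true := by
            rw [htake i (by omega), hcsdef]
            exact validInt_take_of_head_ne _ _ hc (by omega)
          rw [hvi, hvdec i h1 h2]
          simp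

-- ===== VERDICT (by name: the statement is the Claim_ definition above) =====
theorem f_spec : Claim_equal_f := by
  intro s _
  unfold Spec_f
  exact f_eq_f_alt s
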